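-- pv_equiv track=rewrite | github.com/huiliang2liu/decompil | main.py | ver_code
-- ===== SOURCE A (Python) =====
-- def ver_code(ver):
--     ss = str(ver).split('.')
--     power = len(ss) - 1
--     if len(ss) < 1:
--         return 0
--     vc = 0
--     for i in range(len(ss)):
--         vc += int(ss[i]) * 100 ** (power - i)
--     return vc
-- ===== SOURCE B (Python) =====
-- def ver_code(ver):
--     vc = 0
--     for p in str(ver).split('.'):
--         vc = vc * 100 + int(p)
--     return vc
-- ===== Notes on version B (the rewrite author's own statement) =====
-- stated objective: simpler
-- what changed: Replaces the power-sum with explicit 100**(power-i) exponentiation and index bookkeeping by a single Horner accumulator vc = vc*100 + int(p) over the parts.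
import Mathlib
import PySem

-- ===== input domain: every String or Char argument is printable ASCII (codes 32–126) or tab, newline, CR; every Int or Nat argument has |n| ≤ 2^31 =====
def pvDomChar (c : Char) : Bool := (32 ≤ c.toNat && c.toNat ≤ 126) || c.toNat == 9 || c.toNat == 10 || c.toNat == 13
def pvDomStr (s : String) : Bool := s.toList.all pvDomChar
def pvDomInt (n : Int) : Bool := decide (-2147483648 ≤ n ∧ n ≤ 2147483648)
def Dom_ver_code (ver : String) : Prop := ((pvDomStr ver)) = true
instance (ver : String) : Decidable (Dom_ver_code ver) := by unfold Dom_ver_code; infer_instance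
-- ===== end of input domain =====

-- B replaces A's explicit 100**(power-i) power-sum over indices by a Horner accumulator over the parts (simpler).

-- ===== PORT A =====
def ver_code (ver : String) : Int :=
  let ss := ((PySem.Str.split? ver ".").getD [])
  let power : Int := (ss.length : Int) - 1
  if (ss.length : Int) < 1 then 0
  else
    (PySem.List.pyRange 0 (ss.length : Int) 1).foldl
      (fun vc i =>
        vc + (PySem.Int.ofStr? (PySem.List.pyGetD ss i "")).getD 0 * (100 : Int) ^ (power - i).toNat)
      0

-- ===== PORT B =====
def ver_code_alt (ver : String) : Int :=
  (((PySem.Str.split? ver ".").getD [])).foldl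
    (fun vc p => vc * 100 + (PySem.Int.ofStr? p).getD 0) 0

-- ===== PRECONDITION & SPEC =====
-- Pre_ excludes exactly the inputs where some dot-separated part is not int()-parseable (Python raises ValueError).
def Pre_ver_code (ver : String) : Prop :=
  (((PySem.Str.split? ver ".").getD [])).all (fun p => (PySem.Int.ofStr? p).isSome) = true
instance (ver : String) : Decidable (Pre_ver_code ver) := by unfold Pre_ver_code; infer_instance
def pvWitness_ver_code : String := "1.2.3"
def Spec_ver_code (ver : String) (out : Int) : Prop := out = ver_code_alt ver
instance (ver : String) (out : Int) : Decidable (Spec_ver_code ver out) := by unfold Spec_ver_code; infer_instance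

-- ===== CLAIM (what is proved, stated in full; the proofs are below) =====
def Claim_equal_ver_code : Prop := ∀ (ver : String), Dom_ver_code ver → Pre_ver_code ver → Spec_ver_code ver (ver_code ver)

-- ===== LEMMAS AND PROOFS =====

-- Horner's fold with a nonzero accumulator.
theorem pvHornerShift (f : String → Int) (ss : List String) :
    ∀ (acc : Int),
      ss.foldl (fun vc p => vc * 100 + f p) acc
        = acc * 100 ^ ss.length + ss.foldl (fun vc p => vc * 100 + f p) 0 := by
  induction ss with
  | nil => intro acc; simp
  | cons p t ih =>
      intro acc
      simp only [List.foldl_cons, List.length_cons]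
      rw [ih (acc * 100 + f p), ih (0 * 100 + f p)]
      ring

-- A sum-accumulating loop over range m.
theorem pvFoldlRangeAdd (h : Nat → Int) :
    ∀ (m : Nat) (acc : Int),
      (List.range m).foldl (fun vc k => vc + h k) acc
        = acc + ∑ k ∈ Finset.range m, h k := by
  intro m
  induction m with
  | zero => intro acc; simp
  | succ m ih =>
      intro acc
      rw [List.range_succ, List.foldl_append, ih, Finset.sum_range_succ]
      simp [add_assoc]

-- The power-sum equals Horner's fold.
theorem pvSumEqHorner (f : String → Int) :
    ∀ (ss : List String),
      (∑ k ∈ Finset.range ss.length, f (ss.getD k "") * 100 ^ (ss.length - 1 - k))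
        = ss.foldl (fun vc p => vc * 100 + f p) 0 := by
  intro ss
  induction ss with
  | nil => simp
  | cons p t ih =>
      rw [List.length_cons, Finset.sum_range_succ']
      have h1 : ∀ k ∈ Finset.range t.length,
          f ((p :: t).getD (k + 1) "") * (100 : Int) ^ (t.length + 1 - 1 - (k + 1))
            = f (t.getD k "") * (100 : Int) ^ (t.length - 1 - k) := by
        intro k _
        rw [List.getD_cons_succ]
        congr 2
        omega
      rw [Finset.sum_congr rfl h1, ih, List.foldl_cons, pvHornerShift]
      simp only [List.getD_cons_zero, Nat.add_sub_cancel, Nat.sub_zero]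
      rw [pvHornerShift f t (0 * 100 + f p)]
      ring

-- ===== VERDICT (by name: the statement is the Claim_ definition above) =====
theorem ver_code_spec : Claim_equal_ver_code := by
  intro ver _ _
  unfold Spec_ver_code ver_code ver_code_alt
  set ss := ((PySem.Str.split? ver ".").getD []) with hss
  by_cases hnil : ss = []
  · simp [hnil]
  · have hlen : 0 < ss.length := List.length_pos_iff.mpr hnil
    rw [if_neg (by omega)]
    rw [PySem.List.pyRange_one]
    simp only [sub_zero, Int.toNat_natCast, List.foldl_map, zero_add]
    have hcong :
        (List.range ss.length).foldl
          (fun vc (k : Nat) =>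
            vc + (PySem.Int.ofStr? (PySem.List.pyGetD ss (k : Int) "")).getD 0 *
              (100 : Int) ^ (((ss.length : Int) - 1) - (k : Int)).toNat) 0
        = (List.range ss.length).foldl
            (fun vc (k : Nat) =>
              vc + (PySem.Int.ofStr? (ss.getD k "")).getD 0 *
                (100 : Int) ^ (ss.length - 1 - k)) 0 := by
      apply PySem.List.foldl_congr_mem
      intro acc k hk
      have hk' : k < ss.length := List.mem_range.mp hk
      have : (((ss.length : Int) - 1) - (k : Int)).toNat = ss.length - 1 - k := by omega
      rw [this, PySem.List.pyGetD_natCast]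
    rw [hcong, pvFoldlRangeAdd, zero_add,
      pvSumEqHorner (fun p => (PySem.Int.ofStr? p).getD 0) ss]
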